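-- pv_equiv track=rewrite | github.com/unifyai/unity | tests/test_async_tool_loop/async_helpers.py | _count_user_interjections
-- ===== SOURCE A (Python) =====
-- from typing import List, Sequence, Any
--
-- def _count_user_interjections(msgs: Sequence[Any], contains: str | None) -> int:
--     """Count user messages after the first one (interjections) matching optional substring."""
--     first_user_seen = False
--     count = 0
--     for m in msgs or []:
--         if m.get("role") == "user":
--             if not first_user_seen:
--                 first_user_seen = True
--                 continue
--             # This is an interjection (user message after the first)
--             if contains is None or contains in (m.get("content") or ""):
--                 count += 1
--     return count
-- ===== SOURCE B (Python) =====
-- def _count_user_interjections(msgs, contains):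
--     """Count user messages after the first one (interjections) matching optional substring."""
--     ms = list(msgs or [])
--
--     def matches(m):
--         return contains is None or contains in (m.get("content") or "")
--
--     # count ALL matching user messages, then subtract the first user message's
--     # own contribution (it is not an interjection)
--     total = sum(1 for m in ms if m.get("role") == "user" and matches(m))
--     first = next((m for m in ms if m.get("role") == "user"), None)
--     if first is not None and matches(first):
--         total -= 1
--     return total
-- ===== Notes on version B (the rewrite author's own statement) =====
-- stated objective: alternative
-- what changed: Instead of a stateful skip-the-first-user loop, B counts every matching user message over the whole list and then subtracts the first user message's own contribution (found separately with next()).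
import Mathlib
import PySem

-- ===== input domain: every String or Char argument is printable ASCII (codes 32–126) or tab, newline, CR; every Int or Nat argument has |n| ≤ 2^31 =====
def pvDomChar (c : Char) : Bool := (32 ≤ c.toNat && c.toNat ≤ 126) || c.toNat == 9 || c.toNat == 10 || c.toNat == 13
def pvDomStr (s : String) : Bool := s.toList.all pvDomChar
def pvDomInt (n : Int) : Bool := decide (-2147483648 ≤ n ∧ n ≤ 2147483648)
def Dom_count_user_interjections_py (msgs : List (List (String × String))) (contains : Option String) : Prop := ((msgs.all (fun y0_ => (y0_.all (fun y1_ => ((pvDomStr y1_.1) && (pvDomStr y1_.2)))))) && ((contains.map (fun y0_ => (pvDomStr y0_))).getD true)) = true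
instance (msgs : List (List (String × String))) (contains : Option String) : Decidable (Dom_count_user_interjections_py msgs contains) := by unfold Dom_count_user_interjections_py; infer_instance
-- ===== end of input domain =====

-- B: instead of A's stateful skip-the-first-user loop, count ALL matching user
-- messages and subtract the first user message's own contribution (objective: alternative).

-- ===== PORT A =====
-- the loop: state (first_user_seen, count); 'msgs or []' iterates the same elements
def count_user_interjections_py (msgs : List (List (String × String))) (contains : Option String) : Int :=
  (msgs.foldl
    (fun (st : Bool × Int) (m : List (String × String)) =>
      if (PySem.Dict.mk m).get? "role" == some "user" then
        if !st.1 then (true, st.2)  -- first user message: set flag, continue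
        else if (match contains with
                 | none => true
                 | some c => PySem.Str.isIn c ((PySem.Dict.mk m).getD "content" ""))  -- (m.get("content") or "") = getD "" on string values
             then (st.1, st.2 + 1) else st
      else st)
    (false, 0)).2

-- ===== PORT B =====
def count_user_interjections_py_alt (msgs : List (List (String × String))) (contains : Option String) : Int :=
  let matchesF := fun (m : List (String × String)) =>
    match contains with
    | none => true
    | some c => PySem.Str.isIn c ((PySem.Dict.mk m).getD "content" "")
  -- total = sum(1 for m in ms if role == 'user' and matches(m))
  let total : Int := msgs.countP (fun m => ((PySem.Dict.mk m).get? "role" == some "user") && matchesF m)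
  -- first = next((m for m in ms if role == 'user'), None)
  match msgs.find? (fun m => (PySem.Dict.mk m).get? "role" == some "user") with
  | some first => if matchesF first then total - 1 else total
  | none => total

-- ===== PRECONDITION & SPEC =====
def Spec_count_user_interjections_py (msgs : List (List (String × String))) (contains : Option String) (out : Int) : Prop := out = count_user_interjections_py_alt msgs contains
instance (msgs : List (List (String × String))) (contains : Option String) (out : Int) : Decidable (Spec_count_user_interjections_py msgs contains out) := by unfold Spec_count_user_interjections_py; infer_instance

-- ===== CLAIM (what is proved, stated in full; the proofs are below) =====
def Claim_equal_count_user_interjections_py : Prop := ∀ (msgs : List (List (String × String))) (contains : Option String), Dom_count_user_interjections_py msgs contains → Spec_count_user_interjections_py msgs contains (count_user_interjections_py msgs contains)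

-- ===== LEMMAS AND PROOFS =====

-- abbreviations for the two tests (proof-side only)
def pvIsUser (m : List (String × String)) : Bool :=
  (PySem.Dict.mk m).get? "role" == some "user"

def pvMatches (contains : Option String) (m : List (String × String)) : Bool :=
  match contains with
  | none => true
  | some c => PySem.Str.isIn c ((PySem.Dict.mk m).getD "content" "")

def pvStep (contains : Option String) (st : Bool × Int) (m : List (String × String)) : Bool × Int :=
  if pvIsUser m then
    if !st.1 then (true, st.2)
    else if pvMatches contains m then (st.1, st.2 + 1) else st
  else st

-- once the flag is set, the loop counts every matching user message
theorem pv_fold_true (contains : Option String) :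
    ∀ (msgs : List (List (String × String))) (count : Int),
      (msgs.foldl (pvStep contains) (true, count)).2
        = count + ((msgs.countP (fun m => pvIsUser m && pvMatches contains m)) : Int) := by
  intro msgs
  induction msgs with
  | nil => simp
  | cons m rest ih =>
      intro count
      by_cases hu : pvIsUser m = true
      · by_cases hm : pvMatches contains m = true
        · simp [pvStep, hu, hm, ih]; ring
        · simp [pvStep, hu, hm, ih]
      · simp [pvStep, hu, ih]

-- A's loop from the initial state equals B's count-all-then-subtract-first value
theorem pv_fold_false (contains : Option String) :
    ∀ (msgs : List (List (String × String))),
      (msgs.foldl (pvStep contains) (false, 0)).2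
        = (match msgs.find? pvIsUser with
           | some first =>
              if pvMatches contains first then
                ((msgs.countP (fun m => pvIsUser m && pvMatches contains m)) : Int) - 1
              else ((msgs.countP (fun m => pvIsUser m && pvMatches contains m)) : Int)
           | none => ((msgs.countP (fun m => pvIsUser m && pvMatches contains m)) : Int)) := by
  intro msgs
  induction msgs with
  | nil => simp
  | cons m rest ih =>
      by_cases hu : pvIsUser m = true
      · by_cases hm : pvMatches contains m = true
        · simp [pvStep, hu, hm, List.find?, pv_fold_true contains rest 0]
        · simp [pvStep, hu, hm, List.find?, pv_fold_true contains rest 0]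
      · simp [pvStep, hu, List.find?, ih]

-- ===== VERDICT (by name: the statement is the Claim_ definition above) =====
theorem count_user_interjections_py_spec : Claim_equal_count_user_interjections_py := by
  intro msgs contains _
  show count_user_interjections_py msgs contains = count_user_interjections_py_alt msgs contains
  have hA : count_user_interjections_py msgs contains
      = (msgs.foldl (pvStep contains) (false, 0)).2 := rfl
  rw [hA, pv_fold_false contains msgs]
  cases contains <;> rfl
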